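-- pv_equiv track=rewrite | github.com/banditburai/opentui-python | src/opentui/components/markdown_blocks.py | _parse_escaped_cells
-- ===== SOURCE A (Python) =====
-- def _parse_escaped_cells(row_text: str) -> list[str]:
--     """Split a table row into cells, handling escaped pipes."""
--     stripped = row_text.strip()
--     if stripped.startswith("|"):
--         stripped = stripped[1:]
--     if stripped.endswith("|"):
--         stripped = stripped[:-1]
--
--     cells = []
--     current = ""
--     i = 0
--     while i < len(stripped):
--         if stripped[i] == "\\" and i + 1 < len(stripped) and stripped[i + 1] == "|":
--             current += "|"
--             i += 2
--         elif stripped[i] == "|":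
--             cells.append(current)
--             current = ""
--             i += 1
--         else:
--             current += stripped[i]
--             i += 1
--     cells.append(current)
--     return [c.strip() for c in cells]
-- ===== SOURCE B (Python) =====
-- def _parse_escaped_cells(row_text: str) -> list[str]:
--     """Split a table row into cells, handling escaped pipes."""
--     stripped = row_text.strip()
--     if stripped.startswith("|"):
--         stripped = stripped[1:]
--     if stripped.endswith("|"):
--         stripped = stripped[:-1]
--
--     # Split on every pipe, then re-join the pieces whose separating pipe
--     # was escaped (the piece before it ended with a backslash).
--     out: list[str] = []
--     for piece in stripped.split("|"):
--         if out and out[-1].endswith("\\"):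
--             out[-1] = out[-1][:-1] + "|" + piece
--         else:
--             out.append(piece)
--     return [p.strip() for p in out]
-- ===== Notes on version B (the rewrite author's own statement) =====
-- stated objective: idiomatic
-- what changed: Replaces A's char-by-char while loop with index stepping and cells/current string accumulators by an idiomatic split on every pipe followed by re-joining the pieces whose separating pipe was escaped (previous piece ends with a backslash).
import Mathlib
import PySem

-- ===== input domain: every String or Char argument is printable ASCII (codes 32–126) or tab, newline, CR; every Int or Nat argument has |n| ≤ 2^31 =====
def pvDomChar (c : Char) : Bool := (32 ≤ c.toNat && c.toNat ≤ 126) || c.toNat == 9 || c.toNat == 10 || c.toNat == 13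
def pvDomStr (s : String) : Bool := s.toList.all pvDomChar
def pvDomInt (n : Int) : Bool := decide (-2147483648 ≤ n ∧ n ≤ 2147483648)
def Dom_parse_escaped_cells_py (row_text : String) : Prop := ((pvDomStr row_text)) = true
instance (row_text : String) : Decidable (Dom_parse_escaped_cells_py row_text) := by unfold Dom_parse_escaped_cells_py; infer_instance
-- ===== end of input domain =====

-- B replaces A's char-by-char accumulator scan by split-on-'|' followed by re-joining the
-- pieces whose separating pipe was escaped (objective: idiomatic; avoids per-char concatenation).

-- ===== PORT A =====
-- A's while loop: cells/current accumulators, escape branch first, index steps by 1 or 2.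
def parseLoopA (cells : List (List Char)) (cur : List Char) : List Char → List (List Char)
  | '\\' :: '|' :: rest => parseLoopA cells (cur ++ ['|']) rest
  | '|' :: rest => parseLoopA (cells ++ [cur]) [] rest
  | c :: rest => parseLoopA cells (cur ++ [c]) rest
  | [] => cells ++ [cur]

def parse_escaped_cells_py (row_text : String) : List String :=
  let stripped := PySem.Chars.strip row_text.toList
  let stripped := if PySem.Chars.startswith stripped ['|'] then PySem.List.slice stripped (some 1) none else stripped
  let stripped := if PySem.Chars.endswith stripped ['|'] then PySem.List.slice stripped none (some (-1)) else stripped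
  (parseLoopA [] [] stripped).map (fun c => String.ofList (PySem.Chars.strip c))

-- ===== PORT B =====
-- B's merge loop: `out[-1]` is PySem.List.pyGetD out (-1) [], `out[-1][:-1]` is the slice,
-- and the assignment `out[-1] = x` on the nonempty `out` is out.dropLast ++ [x].
def mergeEsc (out : List (List Char)) : List (List Char) → List (List Char)
  | [] => out
  | piece :: rest =>
    if out ≠ [] ∧ PySem.Chars.endswith (PySem.List.pyGetD out (-1) []) ['\\'] = true then
      mergeEsc (out.dropLast ++ [PySem.List.slice (PySem.List.pyGetD out (-1) []) none (some (-1)) ++ '|' :: piece]) rest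
    else
      mergeEsc (out ++ [piece]) rest

def parse_escaped_cells_py_alt (row_text : String) : List String :=
  let stripped := PySem.Chars.strip row_text.toList
  let stripped := if PySem.Chars.startswith stripped ['|'] then PySem.List.slice stripped (some 1) none else stripped
  let stripped := if PySem.Chars.endswith stripped ['|'] then PySem.List.slice stripped none (some (-1)) else stripped
  -- stripped.split('|'): the separator is nonempty, so Python's split is exactly Chars.splitOn
  let pieces := PySem.Chars.splitOn stripped ['|']
  (mergeEsc [] pieces).map (fun p => String.ofList (PySem.Chars.strip p))

-- ===== PRECONDITION & SPEC =====
def Spec_parse_escaped_cells_py (row_text : String) (out : List String) : Prop := out = parse_escaped_cells_py_alt row_text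
instance (row_text : String) (out : List String) : Decidable (Spec_parse_escaped_cells_py row_text out) := by unfold Spec_parse_escaped_cells_py; infer_instance

-- ===== CLAIM (what is proved, stated in full; the proofs are below) =====
def Claim_equal_parse_escaped_cells_py : Prop := ∀ (row_text : String), Dom_parse_escaped_cells_py row_text → Spec_parse_escaped_cells_py row_text (parse_escaped_cells_py row_text)

-- ===== LEMMAS AND PROOFS =====

-- cons a char onto the first part of a partition
def consHead (c : Char) : List (List Char) → List (List Char)
  | [] => [[c]]
  | p :: ps => (c :: p) :: ps

-- prepend chars onto the first part of a partition
def preHead (q : List Char) : List (List Char) → List (List Char)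
  | [] => [q]
  | p :: ps => (q ++ p) :: ps

-- the common specification: split at every unescaped '|', resolving '\|' to '|'
def splitE : List Char → List (List Char)
  | '\\' :: '|' :: t => consHead '|' (splitE t)
  | '|' :: t => [] :: splitE t
  | c :: t => consHead c (splitE t)
  | [] => [[]]

-- plain split at every '|'
def splitP : List Char → List (List Char)
  | '|' :: t => [] :: splitP t
  | c :: t => consHead c (splitP t)
  | [] => [[]]

-- cons-directed reformulation of B's merge loop
def mergeFrom (q : List Char) : List (List Char) → List (List Char)
  | [] => [q]
  | p :: ps =>
    if PySem.Chars.endswith q ['\\'] = true then mergeFrom (q.dropLast ++ '|' :: p) ps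
    else q :: mergeFrom p ps

theorem consHead_ne_nil (c : Char) (ls : List (List Char)) : consHead c ls ≠ [] := by
  cases ls <;> simp [consHead]

theorem splitE_ne_nil (cs : List Char) : splitE cs ≠ [] := by
  fun_induction splitE cs <;> simp [consHead_ne_nil]

theorem splitP_ne_nil (cs : List Char) : splitP cs ≠ [] := by
  fun_induction splitP cs <;> simp [consHead_ne_nil]

theorem preHead_nil (ls : List (List Char)) (h : ls ≠ []) : preHead [] ls = ls := by
  cases ls with
  | nil => exact absurd rfl h
  | cons p ps => simp [preHead]

theorem splitP_pipe (t : List Char) : splitP ('|' :: t) = [] :: splitP t := rfl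

theorem splitP_cons (c : Char) (t : List Char) (hc : c ≠ '|') :
    splitP (c :: t) = consHead c (splitP t) := by
  rw [splitP]; exact fun h => hc h

-- A's loop computes splitE
theorem parseLoopA_eq (cells : List (List Char)) (cur : List Char) (cs : List Char) :
    parseLoopA cells cur cs = cells ++ preHead cur (splitE cs) := by
  fun_induction parseLoopA cells cur cs with
  | case1 cells cur rest ih =>
    rw [ih, splitE]
    obtain ⟨p, ps, hp⟩ := List.exists_cons_of_ne_nil (splitE_ne_nil rest)
    simp [hp, consHead, preHead]
  | case2 cells cur rest ih =>
    rw [ih, splitE]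
    obtain ⟨p, ps, hp⟩ := List.exists_cons_of_ne_nil (splitE_ne_nil rest)
    simp [hp, preHead]
  | case3 cells cur c rest h1 h2 ih =>
    rw [ih, splitE]
    · obtain ⟨p, ps, hp⟩ := List.exists_cons_of_ne_nil (splitE_ne_nil rest)
      simp [hp, consHead, preHead]
    · exact h1
    · exact fun h => h2 h
  | case4 => simp [splitE, preHead]

-- splitOn with the one-char separator '|' is splitP
theorem splitOn_go_pipe (fuel : Nat) (l : List Char) (cur : List Char) (acc : List (List Char))
    (h : l.length + 1 ≤ fuel) :
    PySem.Chars.splitOn.go ['|'] fuel l cur acc = acc.reverse ++ preHead cur.reverse (splitP l) := by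
  induction fuel generalizing l cur acc with
  | zero => omega
  | succ fuel ih =>
    cases l with
    | nil => simp [PySem.Chars.splitOn.go, splitP, preHead]
    | cons c rest =>
      rw [PySem.Chars.splitOn.go]
      by_cases hc : c = '|'
      · subst hc
        rw [if_pos (by simp [List.isPrefixOf])]
        rw [ih _ _ _ (by simpa using Nat.le_of_succ_le_succ (by simpa using h))]
        obtain ⟨p, ps, hp⟩ := List.exists_cons_of_ne_nil (splitP_ne_nil rest)
        simp [splitP, hp, preHead]
      · rw [if_neg (by simp [List.isPrefixOf]; exact fun h => hc h.symm)]
        rw [ih _ _ _ (by simp at h ⊢; omega)]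
        obtain ⟨p, ps, hp⟩ := List.exists_cons_of_ne_nil (splitP_ne_nil rest)
        rw [splitP_cons _ _ hc]
        simp [hp, consHead, preHead]

theorem splitOn_pipe (cs : List Char) : PySem.Chars.splitOn cs ['|'] = splitP cs := by
  rw [PySem.Chars.splitOn, splitOn_go_pipe _ _ _ _ (by omega)]
  simp [preHead_nil _ (splitP_ne_nil cs)]

-- ''.endswith('\\') on a concat reads the last character
theorem endswith_concat_bs (q : List Char) (c : Char) :
    PySem.Chars.endswith (q ++ [c]) ['\\'] = true ↔ c = '\\' := by
  rw [PySem.Chars.endswith_iff]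
  constructor
  · rintro ⟨pre, hpre⟩
    have := congrArg (·.getLast?) hpre
    simpa using this.symm
  · rintro rfl
    exact ⟨q, rfl⟩

-- B's merge loop in cons direction
theorem mergeEsc_eq_mergeFrom (ps : List (List Char)) (out : List (List Char)) (q : List Char) :
    mergeEsc (out ++ [q]) ps = out ++ mergeFrom q ps := by
  induction ps generalizing out q with
  | nil => simp [mergeEsc, mergeFrom]
  | cons p ps ih =>
    rw [mergeEsc, mergeFrom]
    by_cases hq : PySem.Chars.endswith q ['\\'] = true
    · rw [if_pos (by simp [PySem.List.pyGetD_neg_one_append_singleton, hq]), if_pos hq]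
      rw [PySem.List.pyGetD_neg_one_append_singleton, PySem.List.slice_to_neg_one,
        List.dropLast_concat, ih]
    · rw [if_neg (by simp [PySem.List.pyGetD_neg_one_append_singleton, hq]), if_neg hq]
      rw [show out ++ [q] ++ [p] = (out ++ [q]) ++ [p] from rfl, ih]
      simp

-- the merge of the plain split computes splitE; the invariant `hsafe` says the accumulated
-- part ends with a backslash only when the next character of the rest is not a pipe
theorem mergeFrom_splitP (cs : List Char) (q : List Char)
    (hsafe : PySem.Chars.endswith q ['\\'] = true → cs.head? ≠ some '|') :
    ∀ p ps, splitP cs = p :: ps → mergeFrom (q ++ p) ps = preHead q (splitE cs) := by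
  fun_induction splitE cs generalizing q with
  | case1 t ih =>
    intro p ps hsp
    rw [splitP_cons _ _ (by decide), splitP_pipe] at hsp
    obtain ⟨p', ps', hp'⟩ := List.exists_cons_of_ne_nil (splitP_ne_nil t)
    rw [hp'] at hsp
    simp only [consHead] at hsp
    obtain ⟨hp, hps⟩ := List.cons_eq_cons.mp hsp
    subst hp; subst hps
    rw [mergeFrom, if_pos ((endswith_concat_bs q '\\').mpr rfl)]
    rw [List.dropLast_concat]
    have := ih (q ++ ['|']) (by
      intro h; exact absurd ((endswith_concat_bs q '|').mp h) (by decide)) p' ps' hp'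
    rw [show q ++ '|' :: p' = (q ++ ['|']) ++ p' by simp, this]
    obtain ⟨e, es, he⟩ := List.exists_cons_of_ne_nil (splitE_ne_nil t)
    rw [he]
    simp [consHead, preHead]
  | case2 t ih =>
    intro p ps hsp
    rw [splitP_pipe] at hsp
    obtain ⟨hp, hps⟩ := List.cons_eq_cons.mp hsp
    subst hp; subst hps
    obtain ⟨p', ps', hp'⟩ := List.exists_cons_of_ne_nil (splitP_ne_nil t)
    have hq : ¬ PySem.Chars.endswith q ['\\'] = true := fun h => hsafe h rfl
    rw [hp', List.append_nil, mergeFrom, if_neg hq]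
    have := ih [] (by intro h; exact absurd h (by decide)) p' ps' hp'
    rw [List.nil_append] at this
    rw [this, preHead_nil _ (splitE_ne_nil t)]
    simp [preHead]
  | case3 c t h1 h2 ih =>
    intro p ps hsp
    rw [splitP_cons _ _ h2] at hsp
    obtain ⟨p', ps', hp'⟩ := List.exists_cons_of_ne_nil (splitP_ne_nil t)
    rw [hp'] at hsp
    simp only [consHead] at hsp
    obtain ⟨hp, hps⟩ := List.cons_eq_cons.mp hsp
    subst hp; subst hps
    have hsafe' : PySem.Chars.endswith (q ++ [c]) ['\\'] = true → t.head? ≠ some '|' := by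
      intro h
      have hc := (endswith_concat_bs q c).mp h
      cases t with
      | nil => simp
      | cons x t' =>
        intro hx
        simp only [List.head?_cons, Option.some.injEq] at hx
        exact h1 t' hc (by rw [hx])
    have := ih (q ++ [c]) hsafe' p' ps' hp'
    rw [show q ++ c :: p' = (q ++ [c]) ++ p' by simp, this]
    obtain ⟨e, es, he⟩ := List.exists_cons_of_ne_nil (splitE_ne_nil t)
    rw [he]
    simp [consHead, preHead]
  | case4 =>
    intro p ps hsp
    simp only [splitP] at hsp
    obtain ⟨hp, hps⟩ := List.cons_eq_cons.mp hsp
    subst hp; subst hps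
    simp [mergeFrom, preHead]

theorem mergeEsc_splitP (cs : List Char) : mergeEsc [] (splitP cs) = splitE cs := by
  obtain ⟨p, ps, hp⟩ := List.exists_cons_of_ne_nil (splitP_ne_nil cs)
  rw [hp, mergeEsc, if_neg (by simp)]
  rw [show ([] : List (List Char)) ++ [p] = [] ++ [p] from rfl, mergeEsc_eq_mergeFrom]
  have := mergeFrom_splitP cs [] (by intro h; exact absurd h (by decide)) p ps hp
  rw [List.nil_append] at this ⊢
  rw [this, preHead_nil _ (splitE_ne_nil cs)]

-- ===== VERDICT (by name: the statement is the Claim_ definition above) =====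
theorem parse_escaped_cells_py_spec : Claim_equal_parse_escaped_cells_py := by
  intro row_text _
  unfold Spec_parse_escaped_cells_py parse_escaped_cells_py parse_escaped_cells_py_alt
  simp only [splitOn_pipe, mergeEsc_splitP, parseLoopA_eq, List.nil_append,
    preHead_nil _ (splitE_ne_nil _)]
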